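-- pv_equiv track=rewrite | github.com/jramaswami/Advent-Of-Code-2023 | python/14/day14.py | compute_grid_load
-- ===== SOURCE A (Python) =====
-- def compute_grid_load(grid):
--     load = 0
--     N = len(grid)
--     for r, row in enumerate(grid):
--         for _, cell in enumerate(row):
--             if cell == 'O':
--                 load += N - r
--     return load
-- ===== SOURCE B (Python) =====
-- def compute_grid_load(grid):
--     # Prefix-sum trick: a row at index r has weight N - r, which is exactly the
--     # number of cumulative (prefix) counts it contributes to; so summing the
--     # running count of 'O' rocks after each row gives the total load directly.
--     load = 0
--     running = 0
--     for row in grid: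
--         running += row.count('O')
--         load += running
--     return load
-- ===== Notes on version B (the rewrite author's own statement) =====
-- stated objective: alternative
-- what changed: Replaces the weighted per-cell double loop (load += N - r per 'O') with a prefix-sum accumulation: keep a running count of all 'O' rocks seen so far and add that running count once per row, exploiting that the weight N-r equals the number of prefix sums row r appears in; no weights or multiplications are computed.
import Mathlib
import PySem

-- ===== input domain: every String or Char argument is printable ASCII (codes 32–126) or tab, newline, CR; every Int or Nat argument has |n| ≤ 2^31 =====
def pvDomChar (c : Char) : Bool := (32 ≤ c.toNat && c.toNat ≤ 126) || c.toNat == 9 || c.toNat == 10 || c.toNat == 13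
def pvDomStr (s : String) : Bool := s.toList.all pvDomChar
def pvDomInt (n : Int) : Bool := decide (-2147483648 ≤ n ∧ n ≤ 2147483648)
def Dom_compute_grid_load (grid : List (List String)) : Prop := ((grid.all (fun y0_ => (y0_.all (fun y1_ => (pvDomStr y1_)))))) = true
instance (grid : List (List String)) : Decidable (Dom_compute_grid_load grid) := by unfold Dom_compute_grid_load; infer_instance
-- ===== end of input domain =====

-- B replaces A's weighted per-cell double loop with a prefix-sum accumulation (running rock count added once per row); objective: alternative.

-- ===== PORT A =====
-- 'for r, row in enumerate(grid): for _, cell in enumerate(row): if cell == 'O': load += N - r'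
def compute_grid_load (grid : List (List String)) : Int :=
  let N : Int := grid.length
  (PySem.List.enumerate grid).foldl (fun load rrow =>
    (PySem.List.enumerate rrow.2).foldl (fun load icell =>
      if icell.2 == "O" then load + (N - rrow.1) else load) load) 0

-- ===== PORT B =====
-- 'running += row.count('O'); load += running' over the rows, state (load, running)
def compute_grid_load_alt (grid : List (List String)) : Int :=
  (grid.foldl (fun (s : Int × Int) row =>
    let running := s.2 + (PySem.List.count row "O" : Int)
    (s.1 + running, running)) (0, 0)).1

-- ===== PRECONDITION & SPEC =====
def Spec_compute_grid_load (grid : List (List String)) (out : Int) : Prop := out = compute_grid_load_alt grid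
instance (grid : List (List String)) (out : Int) : Decidable (Spec_compute_grid_load grid out) := by unfold Spec_compute_grid_load; infer_instance

-- ===== CLAIM (what is proved, stated in full; the proofs are below) =====
def Claim_equal_compute_grid_load : Prop := ∀ (grid : List (List String)), Dom_compute_grid_load grid → Spec_compute_grid_load grid (compute_grid_load grid)

-- ===== LEMMAS AND PROOFS =====

-- the inner fold ignores the enumerate index
theorem foldl_enum_snd {α β : Type} (f : β → α → β) (xs : List α) (s : Int) (b : β) :
    (PySem.List.enumerate xs s).foldl (fun b p => f b p.2) b = xs.foldl f b := by
  induction xs generalizing s b with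
  | nil => simp [PySem.List.enumerate_nil]
  | cons x xs ih => rw [PySem.List.enumerate_cons]; simp only [List.foldl_cons]; exact ih _ _

-- A's inner loop adds w once per 'O' cell.
theorem inner_loop_eq (row : List String) (w load : Int) :
    (PySem.List.enumerate row).foldl (fun load icell =>
      if icell.2 == "O" then load + w else load) load
    = load + (PySem.List.count row "O" : Int) * w := by
  rw [show PySem.List.enumerate row = PySem.List.enumerate row 0 from rfl,
    foldl_enum_snd (fun load cell => if cell == "O" then load + w else load)]
  induction row generalizing load with
  | nil => simp [PySem.List.count]
  | cons c cs ih =>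
    simp only [List.foldl_cons]
    by_cases h : c = "O"
    · rw [if_pos (by simp [h]), ih]
      simp [PySem.List.count_eq, h]; ring
    · rw [if_neg (by simp [h]), ih]
      simp [PySem.List.count_eq, h]

-- descending-weight sum: gload w [row0, row1, …] = w*count row0 + (w-1)*count row1 + …
def gload : Int → List (List String) → Int
  | _, [] => 0
  | w, row :: rest => w * (PySem.List.count row "O" : Int) + gload (w - 1) rest

theorem outer_loop_eq (N : Int) (rows : List (List String)) (s : Int) (load : Int) :
    (PySem.List.enumerate rows s).foldl (fun load rrow =>
      (PySem.List.enumerate rrow.2).foldl (fun load icell =>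
        if icell.2 == "O" then load + (N - rrow.1) else load) load) load
    = load + gload (N - s) rows := by
  induction rows generalizing s load with
  | nil => simp [PySem.List.enumerate_nil, gload]
  | cons row rest ih =>
    rw [PySem.List.enumerate_cons]
    simp only [List.foldl_cons]
    rw [inner_loop_eq, ih, gload]
    ring_nf

-- B's prefix-sum fold from state (l, c): final load = l + n*c + gload n rows.
theorem alt_fold_eq (rows : List (List String)) (l c : Int) :
    (rows.foldl (fun (s : Int × Int) row =>
      let running := s.2 + (PySem.List.count row "O" : Int)
      (s.1 + running, running)) (l, c))
    = (l + (rows.length : Int) * c + gload rows.length rows,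
       c + (rows.map (fun row => (PySem.List.count row "O" : Int))).sum) := by
  induction rows generalizing l c with
  | nil => simp [gload]
  | cons row rest ih =>
    simp only [List.foldl_cons]
    rw [ih]
    simp only [gload, List.length_cons, List.map_cons, List.sum_cons]
    rw [Prod.mk.injEq]
    refine ⟨?_, ?_⟩
    · push_cast; ring
    · push_cast; ring

theorem alt_eq_gload (rows : List (List String)) :
    compute_grid_load_alt rows = gload rows.length rows := by
  unfold compute_grid_load_alt
  rw [alt_fold_eq]
  simp

-- ===== VERDICT (by name: the statement is the Claim_ definition above) =====
theorem compute_grid_load_spec : Claim_equal_compute_grid_load := by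
  intro grid _
  unfold Spec_compute_grid_load compute_grid_load
  rw [show PySem.List.enumerate grid = PySem.List.enumerate grid 0 from rfl, outer_loop_eq]
  rw [alt_eq_gload]
  simp
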